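-- pv_equiv track=rewrite | github.com/zinebfadili/stream-routing-metaheuristics | constraint-programming/modelisation.py | get_forbidden
-- ===== SOURCE A (Python) =====
-- def get_forbidden(links, streams):
--     forbidden = [[] for _ in range(len(streams))]
--
--     for idx_link, link in enumerate(links):
--         for idx_stream, stream in enumerate(streams):
--             if stream[0] == link[1]:
--                 forbidden[idx_stream].append(idx_link)
--             if stream[1] == link[0]:
--                 forbidden[idx_stream].append(idx_link)
--
--     return forbidden
-- ===== SOURCE B (Python) =====
-- def get_forbidden(links, streams):
--     # Index links once by each endpoint, then per stream merge the two sorted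
--     # index lists (ties: destination-match index first), O(L + S + output).
--     by_dst = {}  # node -> ascending indices i with links[i][1] == node
--     by_src = {}  # node -> ascending indices i with links[i][0] == node
--     for i, (u, v) in enumerate(links):
--         by_dst.setdefault(v, []).append(i)
--         by_src.setdefault(u, []).append(i)
--
--     def merge(xs, ys):
--         out = []
--         a = b = 0
--         while a < len(xs) and b < len(ys):
--             if xs[a] <= ys[b]:
--                 out.append(xs[a]); a += 1
--             else:
--                 out.append(ys[b]); b += 1
--         out.extend(xs[a:])
--         out.extend(ys[b:])
--         return out
--
--     return [merge(by_dst.get(s0, []), by_src.get(s1, [])) for s0, s1 in streams]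
-- ===== Notes on version B (the rewrite author's own statement) =====
-- stated objective: faster
-- what changed: Instead of the nested links-by-streams scan, B indexes links once into two dicts keyed by endpoint node and, per stream, merges the two pre-sorted index lists with a two-pointer merge (ties take the destination-match first), removing the inner scan.
import Mathlib
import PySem

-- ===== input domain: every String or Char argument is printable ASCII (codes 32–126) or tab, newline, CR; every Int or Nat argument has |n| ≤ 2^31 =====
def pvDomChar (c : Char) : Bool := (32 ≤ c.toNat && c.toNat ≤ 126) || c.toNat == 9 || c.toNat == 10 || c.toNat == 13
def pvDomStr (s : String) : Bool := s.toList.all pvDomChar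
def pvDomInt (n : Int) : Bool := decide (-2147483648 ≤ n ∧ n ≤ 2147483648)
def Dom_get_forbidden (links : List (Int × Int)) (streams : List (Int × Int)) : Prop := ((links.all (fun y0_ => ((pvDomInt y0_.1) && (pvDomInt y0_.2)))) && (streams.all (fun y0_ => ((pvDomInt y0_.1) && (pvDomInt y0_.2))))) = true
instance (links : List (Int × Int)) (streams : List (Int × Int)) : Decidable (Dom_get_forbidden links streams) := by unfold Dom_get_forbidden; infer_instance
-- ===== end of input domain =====

-- B replaces the nested links×streams scan by two endpoint-indexed dicts built once,
-- plus a two-pointer merge of the two sorted index lists per stream (faster).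

-- ===== PORT A =====
-- literal port of the nested loop; idx_stream from enumerate is a nonnegative in-range
-- index, so .toNat is exact here (Python never sees a negative index)
def get_forbidden (links : List (Int × Int)) (streams : List (Int × Int)) : List (List Int) :=
  let forbidden : List (List Int) := List.replicate streams.length []
  (PySem.List.enumerate links).foldl
    (fun forbidden il =>
      (PySem.List.enumerate streams).foldl
        (fun f js =>
          let f := if js.2.1 = il.2.2 then f.modify js.1.toNat (fun r => r ++ [il.1]) else f
          if js.2.2 = il.2.1 then f.modify js.1.toNat (fun r => r ++ [il.1]) else f)
        forbidden)
    forbidden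

-- ===== PORT B =====
-- two-pointer merge of two ascending index lists; on a tie the left (destination-match) element goes first
def gfMerge : List Int → List Int → List Int
  | [], ys => ys
  | x :: xs, [] => x :: xs
  | x :: xs, y :: ys => if x ≤ y then x :: gfMerge xs (y :: ys) else y :: gfMerge (x :: xs) ys

def get_forbidden_alt (links : List (Int × Int)) (streams : List (Int × Int)) : List (List Int) :=
  let ds :=
    (PySem.List.enumerate links).foldl
      (fun (d : PySem.Dict Int (List Int) × PySem.Dict Int (List Int)) p =>
        (d.1.modify p.2.2 [] (fun r => r ++ [p.1]), d.2.modify p.2.1 [] (fun r => r ++ [p.1])))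
      (PySem.Dict.empty, PySem.Dict.empty)
  streams.map (fun s => gfMerge (ds.1.getD s.1 []) (ds.2.getD s.2 []))

-- ===== PRECONDITION & SPEC =====
def Spec_get_forbidden (links : List (Int × Int)) (streams : List (Int × Int)) (out : List (List Int)) : Prop := out = get_forbidden_alt links streams
instance (links : List (Int × Int)) (streams : List (Int × Int)) (out : List (List Int)) : Decidable (Spec_get_forbidden links streams out) := by unfold Spec_get_forbidden; infer_instance

-- ===== CLAIM (what is proved, stated in full; the proofs are below) =====
def Claim_equal_get_forbidden : Prop := ∀ (links : List (Int × Int)) (streams : List (Int × Int)), Dom_get_forbidden links streams → Spec_get_forbidden links streams (get_forbidden links streams)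

-- ===== LEMMAS AND PROOFS =====

-- the per-link contribution to one stream's row
def gfG (i : Int) (l s : Int × Int) : List Int :=
  (if s.1 = l.2 then [i] else []) ++ (if s.2 = l.1 then [i] else [])

-- ascending index lists extracted from an (index, link) list
def gfInd1 (a : Int) (ps : List (Int × (Int × Int))) : List Int :=
  ps.filterMap (fun p => if p.2.2 = a then some p.1 else none)
def gfInd2 (b : Int) (ps : List (Int × (Int × Int))) : List Int :=
  ps.filterMap (fun p => if p.2.1 = b then some p.1 else none)

theorem gfModify_append_cons {α : Type} (f₁ : List α) (r : α) (f₂ : List α) (h : α → α) :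
    (f₁ ++ r :: f₂).modify f₁.length h = f₁ ++ h r :: f₂ := by
  induction f₁ with
  | nil => simp [List.modify]
  | cons x xs ih =>
      simp only [List.modify] at ih ⊢
      simp only [List.cons_append, List.length_cons, List.modifyTailIdx_succ_cons, ih]

theorem gfInner (i : Int) (l : Int × Int) :
    ∀ (ss : List (Int × Int)) (f₁ f₂ : List (List Int)), f₂.length = ss.length →
    (PySem.List.enumerate ss (f₁.length : Int)).foldl
      (fun f js =>
        let f := if js.2.1 = l.2 then f.modify js.1.toNat (fun r => r ++ [i]) else f
        if js.2.2 = l.1 then f.modify js.1.toNat (fun r => r ++ [i]) else f)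
      (f₁ ++ f₂)
    = f₁ ++ List.zipWith (fun r s => r ++ gfG i l s) f₂ ss := by
  intro ss
  induction ss with
  | nil =>
      intro f₁ f₂ h
      have : f₂ = [] := List.eq_nil_of_length_eq_zero (by simpa using h)
      subst this
      simp [PySem.List.enumerate_nil]
  | cons s ss ih =>
      intro f₁ f₂ h
      cases f₂ with
      | nil => simp at h
      | cons r f₂ =>
          have hlen : f₂.length = ss.length := by simpa using h
          have key : ∀ (row : List Int),
              (PySem.List.enumerate ss ((f₁.length : Int) + 1)).foldl
                (fun f js =>
                  let f := if js.2.1 = l.2 then f.modify js.1.toNat (fun r => r ++ [i]) else f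
                  if js.2.2 = l.1 then f.modify js.1.toNat (fun r => r ++ [i]) else f)
                (f₁ ++ row :: f₂)
              = f₁ ++ row :: List.zipWith (fun r s => r ++ gfG i l s) f₂ ss := by
            intro row
            have := ih (f₁ ++ [row]) f₂ hlen
            simp only [List.length_append, List.length_singleton, List.append_assoc,
              List.singleton_append, Nat.cast_add, Nat.cast_one] at this
            exact this
          rw [PySem.List.enumerate_cons]
          simp only [List.foldl_cons]
          by_cases h1 : s.1 = l.2 <;> by_cases h2 : s.2 = l.1 <;>
            simp only [h1, h2, if_pos, if_neg, not_false_iff, Int.toNat_natCast,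
              gfModify_append_cons, key, List.append_assoc, List.singleton_append] <;>
            simp [gfG, h1, h2]

theorem gfZip_id (f : List (List Int)) (ss : List (Int × Int)) (h : f.length = ss.length) :
    List.zipWith (fun (r : List Int) (_ : Int × Int) => r) f ss = f := by
  induction f generalizing ss with
  | nil => simp
  | cons r f ih =>
      cases ss with
      | nil => simp at h
      | cons s ss => simp [ih ss (by simpa using h)]

theorem gfZip_fuse (u : List Int → (Int × Int) → List Int) (g : List Int → (Int × Int) → List Int)
    (f : List (List Int)) (ss : List (Int × Int)) :
    List.zipWith g (List.zipWith u f ss) ss = List.zipWith (fun r s => g (u r s) s) f ss := by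
  induction f generalizing ss with
  | nil => simp
  | cons r f ih =>
      cases ss with
      | nil => simp
      | cons s ss => simp [ih ss]

theorem gfOuter :
    ∀ (ps : List (Int × (Int × Int))) (f : List (List Int)) (ss : List (Int × Int)),
    f.length = ss.length →
    ps.foldl
      (fun forbidden il =>
        (PySem.List.enumerate ss).foldl
          (fun f js =>
            let f := if js.2.1 = il.2.2 then f.modify js.1.toNat (fun r => r ++ [il.1]) else f
            if js.2.2 = il.2.1 then f.modify js.1.toNat (fun r => r ++ [il.1]) else f)
          forbidden)
      f
    = List.zipWith (fun r s => ps.foldl (fun r p => r ++ gfG p.1 p.2 s) r) f ss := by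
  intro ps
  induction ps with
  | nil =>
      intro f ss h
      simp [gfZip_id f ss h]
  | cons p ps ih =>
      intro f ss h
      simp only [List.foldl_cons]
      have hstep : (PySem.List.enumerate ss).foldl
          (fun f js =>
            let f := if js.2.1 = p.2.2 then f.modify js.1.toNat (fun r => r ++ [p.1]) else f
            if js.2.2 = p.2.1 then f.modify js.1.toNat (fun r => r ++ [p.1]) else f)
          f
          = List.zipWith (fun r s => r ++ gfG p.1 p.2 s) f ss := by
        have := gfInner p.1 p.2 ss [] f (by simpa using h)
        simpa using this
      rw [hstep, ih _ ss (by simp [Nat.min_eq_left, h]), gfZip_fuse]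

theorem gfDict1 (a : Int) :
    ∀ (ps : List (Int × (Int × Int))) (d : PySem.Dict Int (List Int) × PySem.Dict Int (List Int)),
    ((ps.foldl
      (fun (d : PySem.Dict Int (List Int) × PySem.Dict Int (List Int)) p =>
        (d.1.modify p.2.2 [] (fun r => r ++ [p.1]), d.2.modify p.2.1 [] (fun r => r ++ [p.1])))
      d).1.getD a [])
    = d.1.getD a [] ++ gfInd1 a ps := by
  intro ps
  induction ps with
  | nil => intro d; simp [gfInd1]
  | cons p ps ih =>
      intro d
      simp only [List.foldl_cons, ih, gfInd1, List.filterMap_cons]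
      by_cases hpa : p.2.2 = a
      · subst hpa
        simp [PySem.Dict.getD_modify_self, gfInd1]
      · rw [PySem.Dict.getD_modify_of_ne _ _ _ (fun h => hpa h.symm)]
        simp [hpa, gfInd1]

theorem gfDict2 (b : Int) :
    ∀ (ps : List (Int × (Int × Int))) (d : PySem.Dict Int (List Int) × PySem.Dict Int (List Int)),
    ((ps.foldl
      (fun (d : PySem.Dict Int (List Int) × PySem.Dict Int (List Int)) p =>
        (d.1.modify p.2.2 [] (fun r => r ++ [p.1]), d.2.modify p.2.1 [] (fun r => r ++ [p.1])))
      d).2.getD b [])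
    = d.2.getD b [] ++ gfInd2 b ps := by
  intro ps
  induction ps with
  | nil => intro d; simp [gfInd2]
  | cons p ps ih =>
      intro d
      simp only [List.foldl_cons, ih, gfInd2, List.filterMap_cons]
      by_cases hpb : p.2.1 = b
      · subst hpb
        simp [PySem.Dict.getD_modify_self, gfInd2]
      · rw [PySem.Dict.getD_modify_of_ne _ _ _ (fun h => hpb h.symm)]
        simp [hpb, gfInd2]

theorem gfMerge_nil_right (xs : List Int) : gfMerge xs [] = xs := by
  cases xs <;> simp [gfMerge]

theorem gfMerge_cons_left (i : Int) (xs ys : List Int) (h : ∀ y ∈ ys, i < y) :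
    gfMerge (i :: xs) ys = i :: gfMerge xs ys := by
  cases ys with
  | nil => simp [gfMerge, gfMerge_nil_right]
  | cons y ys =>
      have : i ≤ y := le_of_lt (h y (by simp))
      simp [gfMerge, this]

theorem gfMerge_cons_right (i : Int) (xs ys : List Int) (h : ∀ x ∈ xs, i < x) :
    gfMerge xs (i :: ys) = i :: gfMerge xs ys := by
  cases xs with
  | nil => simp [gfMerge]
  | cons x xs =>
      have hx : ¬ x ≤ i := not_le.mpr (h x (by simp))
      simp [gfMerge, hx]

theorem gfFoldl_append (s : Int × Int) (ps : List (Int × (Int × Int))) (acc : List Int) :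
    ps.foldl (fun r p => r ++ gfG p.1 p.2 s) acc = acc ++ ps.flatMap (fun p => gfG p.1 p.2 s) := by
  induction ps generalizing acc with
  | nil => simp
  | cons p ps ih => simp [ih, List.append_assoc]

theorem gfInd1_cons (a : Int) (p : Int × (Int × Int)) (ps : List (Int × (Int × Int))) :
    gfInd1 a (p :: ps) = (if p.2.2 = a then [p.1] else []) ++ gfInd1 a ps := by
  simp only [gfInd1, List.filterMap_cons]
  split <;> simp_all

theorem gfInd2_cons (b : Int) (p : Int × (Int × Int)) (ps : List (Int × (Int × Int))) :
    gfInd2 b (p :: ps) = (if p.2.1 = b then [p.1] else []) ++ gfInd2 b ps := by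
  simp only [gfInd2, List.filterMap_cons]
  split <;> simp_all

theorem gfRow (s : Int × Int) :
    ∀ (ps : List (Int × (Int × Int))), ps.Pairwise (fun p q => p.1 < q.1) →
    ps.flatMap (fun p => gfG p.1 p.2 s) = gfMerge (gfInd1 s.1 ps) (gfInd2 s.2 ps) := by
  intro ps
  induction ps with
  | nil => intro _; simp [gfInd1, gfInd2, gfMerge]
  | cons p ps ih =>
      intro hpw
      have hlt : ∀ q ∈ ps, p.1 < q.1 := (List.pairwise_cons.mp hpw).1
      have hpw' := (List.pairwise_cons.mp hpw).2
      have m1 : ∀ x ∈ gfInd1 s.1 ps, p.1 < x := by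
        intro x hx
        simp only [gfInd1, List.mem_filterMap] at hx
        obtain ⟨q, hq, hqe⟩ := hx
        split at hqe
        · cases hqe; exact hlt q hq
        · cases hqe
      have m2 : ∀ x ∈ gfInd2 s.2 ps, p.1 < x := by
        intro x hx
        simp only [gfInd2, List.mem_filterMap] at hx
        obtain ⟨q, hq, hqe⟩ := hx
        split at hqe
        · cases hqe; exact hlt q hq
        · cases hqe
      rw [List.flatMap_cons, gfInd1_cons, gfInd2_cons, ih hpw']
      simp only [gfG]
      by_cases c1 : s.1 = p.2.2 <;> by_cases c2 : s.2 = p.2.1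
      · rw [if_pos c1, if_pos c2, if_pos c1.symm, if_pos c2.symm]
        simp only [List.singleton_append, List.nil_append, List.cons_append]
        rw [show gfMerge (p.1 :: gfInd1 s.1 ps) (p.1 :: gfInd2 s.2 ps)
              = p.1 :: gfMerge (gfInd1 s.1 ps) (p.1 :: gfInd2 s.2 ps) by simp [gfMerge],
          gfMerge_cons_right _ _ _ m1]
      · rw [if_pos c1, if_neg c2, if_pos c1.symm, if_neg (fun h => c2 h.symm)]
        simp only [List.singleton_append, List.nil_append, List.cons_append]
        rw [gfMerge_cons_left _ _ _ m2]
      · rw [if_neg c1, if_pos c2, if_neg (fun h => c1 h.symm), if_pos c2.symm]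
        simp only [List.singleton_append, List.nil_append, List.cons_append]
        rw [gfMerge_cons_right _ _ _ m1]
      · rw [if_neg c1, if_neg c2, if_neg (fun h => c1 h.symm), if_neg (fun h => c2 h.symm)]
        simp

theorem gfZip_replicate (ss : List (Int × Int)) (g : List Int → (Int × Int) → List Int) :
    List.zipWith g (List.replicate ss.length ([] : List Int)) ss = ss.map (fun s => g [] s) := by
  induction ss with
  | nil => simp
  | cons s ss ih => simp [List.replicate_succ, ih]

-- ===== VERDICT (by name: the statement is the Claim_ definition above) =====
theorem get_forbidden_spec : Claim_equal_get_forbidden := by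
  intro links streams _
  unfold Spec_get_forbidden get_forbidden get_forbidden_alt
  rw [gfOuter (PySem.List.enumerate links) _ streams (by simp), gfZip_replicate]
  apply List.map_congr_left
  intro s _
  rw [gfFoldl_append, List.nil_append,
    gfRow s _ (PySem.List.pairwise_lt_enumerate links 0),
    gfDict1 s.1, gfDict2 s.2]
  simp
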